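-- pv_equiv track=rewrite | github.com/EFulmer/leetcode-solutions | python/valid_sudoku.py | check_subregion
-- ===== SOURCE A (Python) =====
-- def check_subregion(board, i, j):
--     all_digits = set('123456789')
--     digits_in_subregion = [
--         d for d in get_subregion(board, i, j)
--         if d != '.'
--     ]
--     for digit in digits_in_subregion:
--         try:
--             all_digits.remove(digit)
--         except KeyError:
--             return False
--     return True
--
-- def get_subregion(board, i, j):
--     if i < 0 or j < 0 or i > 2 or j > 2:
--         raise ValueError(f"i and j should be in [0, 2], got {i, j = }")
--     row_start = i * 3
--     row_end = row_start + 3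
--     col_start = j * 3
--     col_end = col_start + 3
--     rows = board[row_start:row_end]
--     subregion = [
--         row[col_start:col_end]
--         for row in board[row_start:row_end]
--     ]
--     flattened_subregion = [
--         r for row in subregion for r in row
--     ]
--     return flattened_subregion
-- ===== SOURCE B (Python) =====
-- def get_subregion(board, i, j):
--     if i < 0 or j < 0 or i > 2 or j > 2:
--         raise ValueError(f"i and j should be in [0, 2], got {i, j = }")
--     row_start = i * 3
--     row_end = row_start + 3
--     col_start = j * 3
--     col_end = col_start + 3
--     return [
--         r
--         for row in board[row_start:row_end]
--         for r in row[col_start:col_end]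
--     ]
--
-- def check_subregion(board, i, j):
--     digits = [d for d in get_subregion(board, i, j) if d != '.']
--     return len(digits) == len(set(digits)) and set(digits) <= set('123456789')
-- ===== Notes on version B (the rewrite author's own statement) =====
-- stated objective: simpler
-- what changed: A's stateful loop that removes each digit from a full 1-9 set and turns a KeyError into False is replaced by a direct check that the filtered digit list has no duplicates (len(digits) == len(set(digits))) and is a subset of set('123456789'); get_subregion is unchanged so the ValueError for bad i,j is preserved.
import Mathlib
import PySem

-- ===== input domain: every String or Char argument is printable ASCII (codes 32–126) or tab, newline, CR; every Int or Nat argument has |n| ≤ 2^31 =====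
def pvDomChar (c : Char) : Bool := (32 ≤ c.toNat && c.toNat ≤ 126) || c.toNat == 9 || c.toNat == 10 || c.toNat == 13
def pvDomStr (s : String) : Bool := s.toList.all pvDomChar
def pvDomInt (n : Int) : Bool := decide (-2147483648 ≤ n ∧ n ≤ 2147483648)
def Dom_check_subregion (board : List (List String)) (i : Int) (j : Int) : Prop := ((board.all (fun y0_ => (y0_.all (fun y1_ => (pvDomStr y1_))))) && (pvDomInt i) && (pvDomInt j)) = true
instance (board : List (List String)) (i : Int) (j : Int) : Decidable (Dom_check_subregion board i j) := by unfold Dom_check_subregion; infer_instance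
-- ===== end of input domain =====

-- B replaces A's remove-from-a-full-set loop (KeyError => False) by a direct
-- cardinality + subset check on the filtered digit list; objective: simpler.

-- ===== PORT A =====
-- get_subregion's ValueError branch (i or j outside [0,2]) is excluded by Pre_.
def get_subregion (board : List (List String)) (i : Int) (j : Int) : List String :=
  let row_start := i * 3
  let row_end := row_start + 3
  let col_start := j * 3
  let col_end := col_start + 3
  let subregion :=
    (PySem.List.slice board (some row_start) (some row_end)).map
      (fun row => PySem.List.slice row (some col_start) (some col_end))
  subregion.flatMap (fun row => row)

-- the 'for digit in …: try: all_digits.remove(digit) except KeyError: return False' loop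
def removeLoop : PySem.Set String → List String → Bool
  | _, [] => true
  | s, d :: rest =>
    match PySem.Set.remove? s d with
    | some s' => removeLoop s' rest
    | none => false

def check_subregion (board : List (List String)) (i : Int) (j : Int) : Bool :=
  let all_digits : PySem.Set String :=
    PySem.Set.ofList ["1", "2", "3", "4", "5", "6", "7", "8", "9"]
  let digits_in_subregion := (get_subregion board i j).filter (fun d => d != ".")
  removeLoop all_digits digits_in_subregion

-- ===== PORT B =====
def get_subregion_alt (board : List (List String)) (i : Int) (j : Int) : List String :=
  let row_start := i * 3
  let row_end := row_start + 3
  let col_start := j * 3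
  let col_end := col_start + 3
  (PySem.List.slice board (some row_start) (some row_end)).flatMap
    (fun row => PySem.List.slice row (some col_start) (some col_end))

def check_subregion_alt (board : List (List String)) (i : Int) (j : Int) : Bool :=
  let digits := (get_subregion_alt board i j).filter (fun d => d != ".")
  ((digits.length : Int) == PySem.Set.len (PySem.Set.ofList digits)) &&
    PySem.Set.issubset (PySem.Set.ofList digits)
      (PySem.Set.ofList ["1", "2", "3", "4", "5", "6", "7", "8", "9"])

-- ===== PRECONDITION & SPEC =====
-- Pre_ excludes exactly the inputs on which A's get_subregion raises ValueError (i or j outside [0,2]).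
def Pre_check_subregion (board : List (List String)) (i : Int) (j : Int) : Prop :=
  0 ≤ i ∧ i ≤ 2 ∧ 0 ≤ j ∧ j ≤ 2
instance (board : List (List String)) (i : Int) (j : Int) : Decidable (Pre_check_subregion board i j) := by unfold Pre_check_subregion; infer_instance

def pvWitness_check_subregion : List (List String) × Int × Int :=
  ([["5", "3", "."], [".", "7", "2"], ["1", ".", "."]], 0, 0)

def Spec_check_subregion (board : List (List String)) (i : Int) (j : Int) (out : Bool) : Prop := out = check_subregion_alt board i j
instance (board : List (List String)) (i : Int) (j : Int) (out : Bool) : Decidable (Spec_check_subregion board i j out) := by unfold Spec_check_subregion; infer_instance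

-- ===== CLAIM (what is proved, stated in full; the proofs are below) =====
def Claim_equal_check_subregion : Prop := ∀ (board : List (List String)) (i : Int) (j : Int), Dom_check_subregion board i j → Pre_check_subregion board i j → Spec_check_subregion board i j (check_subregion board i j)

-- ===== LEMMAS AND PROOFS =====

theorem mem_discard (s : PySem.Set String) (d x : String) :
    x ∈ PySem.Set.discard s d ↔ x ∈ s ∧ x ≠ d := by
  simp [PySem.Set.discard, List.mem_filter]

theorem nodup_discard {s : PySem.Set String} (hs : s.Nodup) (d : String) :
    (PySem.Set.discard s d).Nodup := hs.filter _

-- A's loop succeeds iff the digits are pairwise distinct and all lie in the (duplicate-free) set s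
theorem removeLoop_eq_true_iff (ds : List String) :
    ∀ (s : PySem.Set String), s.Nodup →
      (removeLoop s ds = true ↔ ds.Nodup ∧ ∀ d ∈ ds, d ∈ s) := by
  induction ds with
  | nil => intro s _; simp [removeLoop]
  | cons d rest ih =>
    intro s hs
    by_cases hd : d ∈ s
    · rw [removeLoop, PySem.Set.remove?_of_mem hd]
      rw [ih _ (nodup_discard hs d)]
      simp only [List.nodup_cons, List.mem_cons, mem_discard]
      constructor
      · rintro ⟨hnd, hmem⟩
        refine ⟨⟨fun hc => (hmem d hc).2 rfl, hnd⟩, ?_⟩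
        rintro x (rfl | hx)
        · exact hd
        · exact (hmem x hx).1
      · rintro ⟨⟨hdr, hnd⟩, hmem⟩
        refine ⟨hnd, fun x hx => ⟨hmem x (Or.inr hx), fun hxd => hdr (hxd ▸ hx)⟩⟩
    · rw [removeLoop]
      have : PySem.Set.remove? s d = none := (PySem.Set.remove?_eq_none_iff s d).mpr hd
      rw [this]
      constructor
      · intro h; cases h
      · rintro ⟨_, h⟩
        exact absurd (h d (List.mem_cons_self ..)) hd

theorem foldl_add_sublist (xs : List String) :
    ∀ (s : PySem.Set String), (xs.foldl PySem.Set.add s).Sublist (s ++ xs) := by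
  induction xs with
  | nil => intro s; simp
  | cons x xs ih =>
    intro s
    have h1 : (PySem.Set.add s x).Sublist (s ++ [x]) := by
      unfold PySem.Set.add
      split
      · exact List.sublist_append_left s [x]
      · exact List.Sublist.refl _
    have h2 := (ih (PySem.Set.add s x)).trans (h1.append_right xs)
    have h3 : (s ++ [x]) ++ xs = s ++ (x :: xs) := by simp
    simpa [h3] using h2

theorem ofList_sublist (xs : List String) : (PySem.Set.ofList xs).Sublist xs :=
  foldl_add_sublist xs PySem.Set.empty

theorem length_ofList_eq_iff (xs : List String) :
    (PySem.Set.ofList xs).length = xs.length ↔ xs.Nodup := by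
  constructor
  · intro h
    have := (ofList_sublist xs).eq_of_length h
    rw [← this]
    exact PySem.Set.nodup_ofList xs
  · intro h
    rw [PySem.Set.ofList_eq_self_of_nodup xs h]

-- B's test computes the same Boolean as A's loop, for any duplicate-free reference set s
theorem loop_eq_check (s : PySem.Set String) (hs : s.Nodup) (ds : List String) :
    removeLoop s ds =
      (((ds.length : Int) == PySem.Set.len (PySem.Set.ofList ds)) &&
        PySem.Set.issubset (PySem.Set.ofList ds) s) := by
  rw [Bool.eq_iff_iff, removeLoop_eq_true_iff ds s hs]
  simp only [Bool.and_eq_true, beq_iff_eq, PySem.Set.len, PySem.Set.issubset_iff,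
    PySem.Set.mem_ofList, Int.natCast_inj]
  rw [eq_comm, length_ofList_eq_iff]

theorem get_subregion_eq (board : List (List String)) (i j : Int) :
    get_subregion board i j = get_subregion_alt board i j := by
  simp [get_subregion, get_subregion_alt, List.flatMap_map]

-- ===== VERDICT (by name: the statement is the Claim_ definition above) =====
theorem check_subregion_spec : Claim_equal_check_subregion := by
  intro board i j _ _
  unfold Spec_check_subregion check_subregion check_subregion_alt
  rw [get_subregion_eq]
  exact loop_eq_check _ (by decide) _
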